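-- pv_equiv track=rewrite | github.com/luyanez/SoftwareEngineerInterviewCode | Code/Hashing/minimum_consecutive_cards_pickup.py | minimum_consecutive_cards_pickup
-- ===== SOURCE A (Python) =====
-- from collections import defaultdict
--
-- def minimum_consecutive_cards_pickup(cards):
--     dic = defaultdict(int)
--     ans = float("inf")
--     for i in range(len(cards)):
--         if cards[i] in dic:
--             ans = min(ans, i - dic[cards[i]] + 1)
--
--         dic[cards[i]] = i
--
--     return ans if ans < float("inf") else -1
-- ===== SOURCE B (Python) =====
-- def minimum_consecutive_cards_pickup(cards):
--     best = None
--     for i in range(1, len(cards)):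
--         for j in range(i - 1, -1, -1):
--             if cards[j] == cards[i]:
--                 w = i - j + 1
--                 if best is None or w < best:
--                     best = w
--                 break
--     return -1 if best is None else best
-- ===== Notes on version B (the rewrite author's own statement) =====
-- stated objective: simpler
-- what changed: Replaces the hash map of last-seen indices with a direct nested scan: for each position, search backwards for the nearest previous equal card and track the minimum window; no auxiliary dictionary, at the cost of O(n^2) time.
import Mathlib
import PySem

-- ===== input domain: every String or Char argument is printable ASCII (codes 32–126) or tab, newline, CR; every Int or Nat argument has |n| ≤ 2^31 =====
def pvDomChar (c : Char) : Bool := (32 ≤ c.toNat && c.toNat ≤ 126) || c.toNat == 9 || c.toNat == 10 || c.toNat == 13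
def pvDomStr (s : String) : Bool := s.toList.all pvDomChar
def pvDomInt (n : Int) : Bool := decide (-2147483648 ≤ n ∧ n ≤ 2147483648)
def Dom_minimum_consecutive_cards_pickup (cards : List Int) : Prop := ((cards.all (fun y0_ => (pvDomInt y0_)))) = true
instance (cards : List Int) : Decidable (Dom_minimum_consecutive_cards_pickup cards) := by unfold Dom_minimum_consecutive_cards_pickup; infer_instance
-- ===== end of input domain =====

-- B replaces the hash map of last-seen indices with a direct backward scan for the
-- nearest previous equal card (no dictionary, O(n^2) instead of O(n)); same return value.

-- ===== PORT A =====
-- state: (dic, ans) with ans : Option Int, none = float("inf")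
def minimum_consecutive_cards_pickup (cards : List Int) : Int :=
  match ((PySem.List.pyRange 0 (cards.length : Int) 1).foldl
    (fun (st : PySem.Dict Int Int × Option Int) i =>
      let c := PySem.List.pyGetD cards i 0
      let ans := match st.1.get? c with
        | some p => some (match st.2 with
            | none => i - p + 1
            | some a => min a (i - p + 1))
        | none => st.2
      (st.1.insert c i, ans))
    (PySem.Dict.empty, none)).2 with
  | some a => a
  | none => -1

-- ===== PORT B =====
-- the inner 'for j in range(i-1, -1, -1): … break' loop: first j in js with cards[j] == ci
def pvScanBack (cards : List Int) (ci : Int) : List Int → Option Int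
  | [] => none
  | j :: js => if PySem.List.pyGetD cards j 0 = ci then some j else pvScanBack cards ci js

def minimum_consecutive_cards_pickup_alt (cards : List Int) : Int :=
  match (PySem.List.pyRange 1 (cards.length : Int) 1).foldl
    (fun (best : Option Int) i =>
      match pvScanBack cards (PySem.List.pyGetD cards i 0) (PySem.List.pyRange (i - 1) (-1) (-1)) with
      | some j =>
        let w := i - j + 1
        match best with
        | none => some w
        | some b => if w < b then some w else some b
      | none => best)
    none with
  | some b => b
  | none => -1

-- ===== PRECONDITION & SPEC =====
def Spec_minimum_consecutive_cards_pickup (cards : List Int) (out : Int) : Prop := out = minimum_consecutive_cards_pickup_alt cards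
instance (cards : List Int) (out : Int) : Decidable (Spec_minimum_consecutive_cards_pickup cards out) := by unfold Spec_minimum_consecutive_cards_pickup; infer_instance

-- ===== CLAIM (what is proved, stated in full; the proofs are below) =====
def Claim_equal_minimum_consecutive_cards_pickup : Prop := ∀ (cards : List Int), Dom_minimum_consecutive_cards_pickup cards → Spec_minimum_consecutive_cards_pickup cards (minimum_consecutive_cards_pickup cards)

-- ===== LEMMAS AND PROOFS =====

-- last index j < n with cards[j] = c (as an Int), none if there is no such j
def pvLastIdx (cards : List Int) (c : Int) : Nat → Option Int
  | 0 => none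
  | n+1 => if cards.getD n 0 = c then some (n : Int) else pvLastIdx cards c n

def pvOmin (a : Option Int) (w : Int) : Option Int :=
  some (match a with | none => w | some x => min x w)

-- the common per-index update of the running answer
def pvStep (cards : List Int) (a : Option Int) (n : Nat) : Option Int :=
  match pvLastIdx cards (cards.getD n 0) n with
  | none => a
  | some p => pvOmin a ((n : Int) - p + 1)

-- the running answer after processing indices 0 .. n-1
def pvAns (cards : List Int) : Nat → Option Int
  | 0 => none
  | n+1 => pvStep cards (pvAns cards n) n

lemma pvScanBack_eq_lastIdx (cards : List Int) (c : Int) (i : Nat) :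
    pvScanBack cards c (PySem.List.pyRange ((i : Int) - 1) (-1) (-1)) = pvLastIdx cards c i := by
  induction i with
  | zero =>
      rw [PySem.List.pyRange_neg_one_eq_nil (by omega)]
      rfl
  | succ n ih =>
      rw [show ((n + 1 : Nat) : Int) - 1 = (n : Int) by push_cast; ring,
          PySem.List.pyRange_neg_one_cons (by omega)]
      simp only [pvScanBack, pvLastIdx, PySem.List.pyGetD_natCast]
      rw [show (n : Int) - 1 = ((n : Nat) : Int) - 1 by rfl]
      rw [ih]

-- invariant of A's loop: the dict maps each value to its last index so far,
-- and the running answer is pvAns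
lemma pvA_invariant (cards : List Int) (n : Nat) :
    (∀ c, (((PySem.List.pyRange 0 (n : Int) 1).foldl
      (fun (st : PySem.Dict Int Int × Option Int) i =>
        let c := PySem.List.pyGetD cards i 0
        let ans := match st.1.get? c with
          | some p => some (match st.2 with
              | none => i - p + 1
              | some a => min a (i - p + 1))
          | none => st.2
        (st.1.insert c i, ans))
      (PySem.Dict.empty, none)).1.get? c = pvLastIdx cards c n)) ∧
    ((PySem.List.pyRange 0 (n : Int) 1).foldl
      (fun (st : PySem.Dict Int Int × Option Int) i =>
        let c := PySem.List.pyGetD cards i 0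
        let ans := match st.1.get? c with
          | some p => some (match st.2 with
              | none => i - p + 1
              | some a => min a (i - p + 1))
          | none => st.2
        (st.1.insert c i, ans))
      (PySem.Dict.empty, none)).2 = pvAns cards n := by
  induction n with
  | zero =>
      rw [PySem.List.pyRange_one_eq_nil (by omega)]
      simp [pvLastIdx, pvAns, PySem.Dict.get?_empty]
  | succ n ih =>
      rw [show ((n + 1 : Nat) : Int) = (n : Int) + 1 by push_cast; ring,
          PySem.List.pyRange_one_succ_right (by omega), List.foldl_append]
      obtain ⟨ihd, iha⟩ := ih
      simp only [List.foldl_cons, List.foldl_nil]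
      constructor
      · intro c
        simp only [PySem.List.pyGetD_natCast, PySem.Dict.get?_insert]
        rw [pvLastIdx]
        split_ifs with h1 h2 h2
        · rfl
        · exact absurd h1.symm h2
        · exact absurd h2.symm h1
        · exact ihd c
      · simp only [PySem.List.pyGetD_natCast, pvAns, pvStep, pvOmin]
        rw [ihd (cards.getD n 0), iha]
        cases pvLastIdx cards (cards.getD n 0) n <;> rfl

-- the body of B's loop performs the common update pvStep
lemma pvB_step (cards : List Int) (a : Option Int) (m : Nat) :
    (match pvScanBack cards (PySem.List.pyGetD cards (m : Int) 0) (PySem.List.pyRange ((m : Int) - 1) (-1) (-1)) with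
      | some j =>
        let w := (m : Int) - j + 1
        match a with
        | none => some w
        | some b => if w < b then some w else some b
      | none => a) = pvStep cards a m := by
  rw [pvScanBack_eq_lastIdx]
  simp only [PySem.List.pyGetD_natCast, pvStep, pvOmin]
  cases pvLastIdx cards (cards.getD m 0) m with
  | none => rfl
  | some p =>
      cases a with
      | none => rfl
      | some b =>
          dsimp only
          rw [Int.min_def]
          split_ifs <;> first | rfl | (exfalso; omega)

-- B's loop computes pvAns as well
lemma pvB_fold (cards : List Int) (n : Nat) :
    (PySem.List.pyRange 1 (n : Int) 1).foldl
      (fun (best : Option Int) i =>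
        match pvScanBack cards (PySem.List.pyGetD cards i 0) (PySem.List.pyRange (i - 1) (-1) (-1)) with
        | some j =>
          let w := i - j + 1
          match best with
          | none => some w
          | some b => if w < b then some w else some b
        | none => best)
      none = pvAns cards n := by
  induction n with
  | zero =>
      rw [PySem.List.pyRange_one_eq_nil (by omega)]
      rfl
  | succ n ih =>
      match n, ih with
      | 0, _ =>
          rw [PySem.List.pyRange_one_eq_nil (by omega)]
          simp [pvAns, pvStep, pvLastIdx]
      | Nat.succ m, ih =>
          rw [show ((m + 1 + 1 : Nat) : Int) = ((m + 1 : Nat) : Int) + 1 by push_cast; ring,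
              PySem.List.pyRange_one_succ_right (by push_cast; omega), List.foldl_append]
          rw [ih]
          simp only [List.foldl_cons, List.foldl_nil]
          rw [show pvAns cards (m + 1 + 1) = pvStep cards (pvAns cards (m + 1)) (m + 1) from rfl]
          exact pvB_step cards (pvAns cards (m + 1)) (m + 1)

-- ===== VERDICT (by name: the statement is the Claim_ definition above) =====
theorem minimum_consecutive_cards_pickup_spec : Claim_equal_minimum_consecutive_cards_pickup := by
  intro cards _
  unfold Spec_minimum_consecutive_cards_pickup
  unfold minimum_consecutive_cards_pickup minimum_consecutive_cards_pickup_alt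
  rw [(pvA_invariant cards cards.length).2, pvB_fold cards cards.length]
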